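-- pv_equiv track=rewrite | github.com/jeanmariemcc/Python_beginnings | day12-Assignment-StringsListsWhiles.py | count_fricatives
-- ===== SOURCE A (Python) =====
-- def count_fricatives(my_list):
--     fric_list = ["f", "s", "v", "z"]
--     fricative_count = 0
--     i = 0
--     while i < len(my_list):
--         j = 0
--         while j < len(fric_list):
--             fricative_count += my_list[i].lower().count(fric_list[j])
--             j += 1
--         i += 1
--     return fricative_count
-- ===== SOURCE B (Python) =====
-- def count_fricatives(my_list):
--     return sum(1 for word in my_list for ch in word.lower() if ch in "fsvz")
-- ===== Notes on version B (the rewrite author's own statement) =====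
-- stated objective: simpler
-- what changed: Replaces the doubly-nested index loop with four .count scans per word by a single flat pass that lowercases each word once and counts characters belonging to 'fsvz' by membership.
import Mathlib
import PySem

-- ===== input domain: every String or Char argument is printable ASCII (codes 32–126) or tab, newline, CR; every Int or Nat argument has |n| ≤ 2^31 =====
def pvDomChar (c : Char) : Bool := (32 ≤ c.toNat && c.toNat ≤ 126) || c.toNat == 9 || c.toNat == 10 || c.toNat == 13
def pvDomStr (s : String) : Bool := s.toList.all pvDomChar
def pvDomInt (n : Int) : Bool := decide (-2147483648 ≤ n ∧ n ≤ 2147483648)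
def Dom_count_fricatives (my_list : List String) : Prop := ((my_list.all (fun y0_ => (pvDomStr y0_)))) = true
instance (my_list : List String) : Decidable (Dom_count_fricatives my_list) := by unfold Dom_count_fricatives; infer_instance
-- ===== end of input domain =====

-- B replaces the four per-fricative .count scans inside a doubly-nested index loop by one flat
-- pass over the characters of each lowercased word, counting membership in "fsvz" (simpler).


-- ===== PORT A =====
-- the two while loops walk my_list and fric_list front to back by index: ported as folds
-- over the same lists with the same accumulator fricative_count
def count_fricatives (my_list : List String) : Int :=
  let fric_list : List String := ["f", "s", "v", "z"]
  my_list.foldl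
    (fun fricative_count w =>
      fric_list.foldl
        (fun c f => c + (PySem.Str.count (PySem.Str.lower w) f : Int))
        fricative_count)
    0

-- ===== PORT B =====
-- Source B's flat generator sum: one pass, +1 per lowercased character that lies in "fsvz"
-- ('ch in "fsvz"' on a single character ch is exactly char membership in "fsvz".toList)
def count_fricatives_alt (my_list : List String) : Int :=
  my_list.foldl
    (fun acc w =>
      (PySem.Str.lower w).toList.foldl
        (fun a ch => if ch ∈ "fsvz".toList then a + 1 else a) acc)
    0

-- ===== PRECONDITION & SPEC =====
def Spec_count_fricatives (my_list : List String) (out : Int) : Prop := out = count_fricatives_alt my_list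
instance (my_list : List String) (out : Int) : Decidable (Spec_count_fricatives my_list out) := by unfold Spec_count_fricatives; infer_instance

-- ===== CLAIM (what is proved, stated in full; the proofs are below) =====
def Claim_equal_count_fricatives : Prop := ∀ (my_list : List String), Dom_count_fricatives my_list → Spec_count_fricatives my_list (count_fricatives my_list)

-- ===== LEMMAS AND PROOFS =====

-- Python str.count with a single-character needle is the character count
theorem chars_count_go_singleton (c : Char) (l : List Char) (fuel acc : Nat)
    (h : l.length ≤ fuel) :
    PySem.Chars.count.go [c] fuel l acc = acc + l.count c := by
  induction fuel generalizing l acc with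
  | zero =>
    have : l = [] := List.eq_nil_of_length_eq_zero (Nat.le_zero.mp h)
    subst this; simp [PySem.Chars.count.go]
  | succ n ih =>
    cases l with
    | nil => simp [PySem.Chars.count.go]
    | cons x t =>
      simp only [PySem.Chars.count.go, List.isPrefixOf]
      by_cases hx : c = x
      · subst hx
        simp only [BEq.rfl, Bool.and_true, if_pos]
        rw [List.count_cons_self]
        have := ih t (acc + 1) (by simpa using Nat.le_of_succ_le_succ h)
        simp only [List.length_cons] at this ⊢
        simp [this]; omega
      · have hb : (c == x) = false := by simp [hx]
        simp only [hb, Bool.false_and, if_neg Bool.false_ne_true]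
        rw [List.count_cons_of_ne (by exact fun e => hx e.symm)]
        exact ih t acc (by simpa using Nat.le_of_succ_le_succ h)

theorem chars_count_singleton (c : Char) (l : List Char) :
    PySem.Chars.count l [c] = l.count c := by
  simp [PySem.Chars.count, chars_count_go_singleton c l l.length 0 (Nat.le_refl _)]

-- the four distinct single-char counts together are one countP over membership in "fsvz"
theorem four_counts_eq_countP (l : List Char) :
    (l.count 'f' + l.count 's' + l.count 'v' + l.count 'z' : Nat)
      = l.countP (fun ch => decide (ch ∈ "fsvz".toList)) := by
  induction l with
  | nil => simp
  | cons x t ih =>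
    simp only [List.count_cons, List.countP_cons]
    by_cases hf : x = 'f' <;> by_cases hs : x = 's' <;> by_cases hv : x = 'v' <;>
      by_cases hz : x = 'z' <;> simp_all <;> omega

-- per-word: A's inner fold over the fricative list equals B's per-character fold
theorem inner_eq (w : String) (acc : Int) :
    (["f", "s", "v", "z"] : List String).foldl
        (fun c f => c + (PySem.Str.count (PySem.Str.lower w) f : Int)) acc
      = (PySem.Str.lower w).toList.foldl
          (fun a ch => if ch ∈ "fsvz".toList then a + 1 else a) acc := by
  rw [PySem.List.foldl_ite_add_one]
  have hcnt : ∀ c : Char,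
      PySem.Str.count (PySem.Str.lower w) (String.ofList [c])
        = (PySem.Str.lower w).toList.count c := by
    intro c
    simp only [PySem.Str.count]
    have h : (String.ofList [c]).toList = [c] := by simp
    rw [h]
    exact chars_count_singleton c _
  simp only [List.foldl]
  have hf := hcnt 'f'; have hs := hcnt 's'; have hv := hcnt 'v'; have hz := hcnt 'z'
  simp only [show ("f" : String) = String.ofList ['f'] from rfl,
    show ("s" : String) = String.ofList ['s'] from rfl,
    show ("v" : String) = String.ofList ['v'] from rfl,
    show ("z" : String) = String.ofList ['z'] from rfl, hf, hs, hv, hz]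
  rw [← four_counts_eq_countP]
  push_cast
  ring

theorem folds_eq (my_list : List String) (acc : Int) :
    my_list.foldl
        (fun fricative_count w =>
          (["f", "s", "v", "z"] : List String).foldl
            (fun c f => c + (PySem.Str.count (PySem.Str.lower w) f : Int)) fricative_count)
        acc
      = my_list.foldl
          (fun a w =>
            (PySem.Str.lower w).toList.foldl
              (fun a ch => if ch ∈ "fsvz".toList then a + 1 else a) a)
          acc := by
  induction my_list generalizing acc with
  | nil => rfl
  | cons w t ih =>
    conv_lhs => rw [List.foldl_cons]
    rw [inner_eq, ih, List.foldl_cons]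

-- ===== VERDICT (by name: the statement is the Claim_ definition above) =====
theorem count_fricatives_spec : Claim_equal_count_fricatives := by
  intro my_list _
  unfold Spec_count_fricatives count_fricatives count_fricatives_alt
  exact folds_eq my_list 0
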